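-- pv_equiv track=rewrite | github.com/oda-p/hooong_algo | baekjoon/2504.py | dfs
-- ===== SOURCE A (Python) =====
-- def dfs(tmp_str) -> int:
--     if not tmp_str:
--         return 1
--
--     answer = 0
--     tmp = ""
--     stack = []
--     for ch in tmp_str:
--         if ch in ["(", "["]:
--             stack.append(ch)
--         elif ch in [")", "]"]:
--             stack.pop()
--
--         tmp += ch
--
--         if not stack:
--             multiple_num = 2 if ch == ")" else 3
--             answer += multiple_num * dfs(tmp[1:-1])
--             tmp = ""
--
--     return answer
-- ===== SOURCE B (Python) =====
-- def dfs(tmp_str) -> int: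
--     # Evaluate the string as a sequence of items, kept per nesting level:
--     #   '(seq)' is an item worth 2*value(seq), '[seq]' an item worth 3*value(seq),
--     #   any other single character an item worth 3; value(seq) is the sum of its
--     #   items, except that the empty sequence has value 1.  A level still open at
--     #   the end of the input contributes nothing.  One left-to-right pass.
--     if not tmp_str:
--         return 1
--     totals = [0]        # running sum of item values, one slot per open nesting level
--     empty = [True]      # has the level produced no item yet? (empty sequence -> 1)
--     for ch in tmp_str:
--         if ch in "([":
--             totals.append(0)
--             empty.append(True)
--         elif ch in ")]":
--             inner = totals.pop()
--             if empty.pop():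
--                 inner = 1
--             totals[-1] += (2 if ch == ")" else 3) * inner
--             empty[-1] = False
--         else:
--             totals[-1] += 3
--             empty[-1] = False
--     return totals[0]
-- ===== Notes on version B (the rewrite author's own statement) =====
-- stated objective: faster
-- what changed: Replaces A's recursion on substring copies (each balanced group re-sliced and re-scanned) with one left-to-right pass keeping a per-nesting-level stack of running item sums: a round pair multiplies its inner value by 2, a square pair by 3, any other single character is an item worth 3, an empty inner sequence counts as 1, and a level still open at the end contributes nothing.
import Mathlib
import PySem

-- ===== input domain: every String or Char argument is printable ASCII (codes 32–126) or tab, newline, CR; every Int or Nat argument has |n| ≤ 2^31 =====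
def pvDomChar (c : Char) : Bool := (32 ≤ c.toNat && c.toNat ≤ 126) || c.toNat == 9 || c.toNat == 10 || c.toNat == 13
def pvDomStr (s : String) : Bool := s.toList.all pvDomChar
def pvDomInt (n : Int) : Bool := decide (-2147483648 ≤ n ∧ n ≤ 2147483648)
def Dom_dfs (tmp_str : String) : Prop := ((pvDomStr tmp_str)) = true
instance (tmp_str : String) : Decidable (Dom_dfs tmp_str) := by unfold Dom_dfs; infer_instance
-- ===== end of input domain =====

-- B replaces A's recursion on substring copies by one linear pass over the characters
-- keeping a per-nesting-level stack of running item sums (measured faster, O(n) vs O(n^2)).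
-- ===== PORT A =====
-- A's for-loop, step for step; `rec` is the recursive call `dfs(tmp[1:-1])` (fuel-instantiated below).
-- state: answer, tmp (accumulated chars), stack (pushed opener chars).
def loopA (rec : List Char → Int) : List Char → Int → List Char → List Char → Int
  | [], ans, _, _ => ans
  | ch :: rest, ans, tmp, stk =>
    let stk' := if ch == '(' || ch == '[' then ch :: stk
      else if ch == ')' || ch == ']' then stk.tail  -- Python stack.pop(): raises IndexError on [] (excluded by Pre_dfs)
      else stk
    let tmp' := tmp ++ [ch]
    if stk'.isEmpty then
      -- tmp[1:-1] for the nonempty tmp' is exactly (drop 1).dropLast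
      loopA rec rest (ans + (if ch == ')' then 2 else 3) * rec ((tmp'.drop 1).dropLast)) [] stk'
    else
      loopA rec rest ans tmp' stk'

-- fuel = one more than the string length always suffices: each recursive call is on a strictly shorter list
def dfsA : Nat → List Char → Int
  | 0, _ => 0  -- fuel exhausted: unreachable from dfs
  | f + 1, cs => if cs = [] then 1 else loopA (dfsA f) cs 0 [] []

def dfs (tmp_str : String) : Int := dfsA (tmp_str.toList.length + 1) tmp_str.toList

-- ===== PORT B =====
-- Source B's loop body; the state is the stack of open nesting levels, each a pair
-- (running sum of item values, "no item yet" flag); cons = top of the Python lists.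
def stepL (st : List (Int × Bool)) (ch : Char) : List (Int × Bool) :=
  if ch == '(' || ch == '[' then (0, true) :: st
  else if ch == ')' || ch == ']' then
    match st with
    | (inner, e) :: (t, _) :: rest =>
        (t + (if ch == ')' then 2 else 3) * (if e then 1 else inner), false) :: rest
    | st => st  -- Python raises IndexError here (excluded by Pre_dfs)
  else
    match st with
    | (t, _) :: rest => (t + 3, false) :: rest
    | [] => []  -- unreachable: the level stack is never empty

-- Source B's `return totals[0]`: the bottom of the cons-stack is its getLast
def dfs_alt (tmp_str : String) : Int :=
  if tmp_str.toList.isEmpty then 1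
  else match (tmp_str.toList.foldl stepL [(0, true)]).getLast? with
    | some te => te.1
    | none => 0  -- unreachable: the level stack is never empty

-- ===== PRECONDITION & SPEC =====
def wCh (c : Char) : Int := if c == '(' || c == '[' then 1 else if c == ')' || c == ']' then -1 else 0
def dep (cs : List Char) : Int := (cs.map wCh).sum

-- Pre_ excludes exactly the inputs where Python A raises IndexError (a prefix with more closers than openers).
def Pre_dfs (tmp_str : String) : Prop := ∀ k : Nat, k ≤ tmp_str.toList.length → 0 ≤ dep (tmp_str.toList.take k)
instance (tmp_str : String) : Decidable (Pre_dfs tmp_str) := by unfold Pre_dfs; infer_instance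

def pvWitness_dfs : String := "(()[[]])x([])"

def Spec_dfs (tmp_str : String) (out : Int) : Prop := out = dfs_alt tmp_str
instance (tmp_str : String) (out : Int) : Decidable (Spec_dfs tmp_str out) := by unfold Spec_dfs; infer_instance

-- ===== CLAIM (what is proved, stated in full; the proofs are below) =====
def Claim_equal_dfs : Prop := ∀ (tmp_str : String), Dom_dfs tmp_str → Pre_dfs tmp_str → Spec_dfs tmp_str (dfs tmp_str)

-- ===== LEMMAS AND PROOFS =====

-- depth bookkeeping
theorem dep_nil : dep [] = 0 := rfl
theorem dep_cons (c : Char) (cs : List Char) : dep (c :: cs) = wCh c + dep cs := by simp [dep]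
theorem dep_append (u v : List Char) : dep (u ++ v) = dep u + dep v := by simp [dep]

theorem wCh_cases (c : Char) : wCh c = 1 ∨ wCh c = 0 ∨ wCh c = -1 := by
  unfold wCh; split_ifs <;> simp

theorem wCh_open {c : Char} (h : (c == '(' || c == '[') = true) : wCh c = 1 := by
  simp [wCh, h]

theorem wCh_close {c : Char} (hop : (c == '(' || c == '[') = false)
    (h : (c == ')' || c == ']') = true) : wCh c = -1 := by
  simp [wCh, hop, h]

theorem wCh_other {c : Char} (h1 : (c == '(' || c == '[') = false)
    (h2 : (c == ')' || c == ']') = false) : wCh c = 0 := by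
  simp [wCh, h1, h2]

theorem close_open_false {c : Char} (h : (c == ')' || c == ']') = true) :
    (c == '(' || c == '[') = false := by
  rcases Bool.or_eq_true_iff.mp h with h' | h' <;> rw [show c = _ from beq_iff_eq.mp h'] <;> rfl

theorem wCh_close_of_eq {c : Char} (h : wCh c = -1) : (c == ')' || c == ']') = true := by
  by_cases h1 : (c == '(' || c == '[') = true
  · rw [wCh_open h1] at h; omega
  · by_cases h2 : (c == ')' || c == ']') = true
    · exact h2
    · rw [wCh_other (Bool.not_eq_true _ ▸ h1 :) (Bool.not_eq_true _ ▸ h2 :)] at h; omega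

-- ---- A-side loop lemmas ----
theorem dfsA_nil {f : Nat} (h : 1 ≤ f) : dfsA f [] = 1 := by
  cases f with
  | zero => omega
  | succ f => simp [dfsA]

theorem loopA_cons_open (rec : List Char → Int) {ch : Char} (rest : List Char) (ans : Int)
    (tmp stk : List Char) (hop : (ch == '(' || ch == '[') = true) :
    loopA rec (ch :: rest) ans tmp stk = loopA rec rest ans (tmp ++ [ch]) (ch :: stk) := by
  simp [loopA, hop]

theorem loopA_cons_close (rec : List Char → Int) {ch : Char} (rest : List Char) (ans : Int)
    (tmp stk : List Char) (hop : (ch == '(' || ch == '[') = false)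
    (hcl : (ch == ')' || ch == ']') = true) :
    loopA rec (ch :: rest) ans tmp stk =
      if stk.tail.isEmpty then
        loopA rec rest (ans + (if ch == ')' then 2 else 3) * rec (((tmp ++ [ch]).drop 1).dropLast)) [] stk.tail
      else loopA rec rest ans (tmp ++ [ch]) stk.tail := by
  simp [loopA, hop, hcl]

theorem loopA_cons_other (rec : List Char → Int) {ch : Char} (rest : List Char) (ans : Int)
    (tmp stk : List Char) (hop : (ch == '(' || ch == '[') = false)
    (hcl : (ch == ')' || ch == ']') = false) :
    loopA rec (ch :: rest) ans tmp stk =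
      if stk.isEmpty then
        loopA rec rest (ans + 3 * rec (((tmp ++ [ch]).drop 1).dropLast)) [] stk
      else loopA rec rest ans (tmp ++ [ch]) stk := by
  have h3 : (ch == ')') = false := (Bool.or_eq_false_iff.mp hcl).1
  have h4 : (ch == ']') = false := (Bool.or_eq_false_iff.mp hcl).2
  simp [loopA, hop, h3, h4]

theorem loopA_add (rec : List Char → Int) :
    ∀ (cs : List Char) (a b : Int) (tmp stk : List Char),
      loopA rec cs (a + b) tmp stk = a + loopA rec cs b tmp stk := by
  intro cs
  induction cs with
  | nil => intro a b tmp stk; simp [loopA]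
  | cons ch rest ih =>
    intro a b tmp stk
    by_cases hop : (ch == '(' || ch == '[') = true
    · rw [loopA_cons_open rec rest _ tmp stk hop, loopA_cons_open rec rest b tmp stk hop]
      exact ih a b _ _
    · have hop' : (ch == '(' || ch == '[') = false := Bool.not_eq_true _ ▸ hop
      by_cases hcl : (ch == ')' || ch == ']') = true
      · rw [loopA_cons_close rec rest _ tmp stk hop' hcl,
            loopA_cons_close rec rest b tmp stk hop' hcl]
        split
        · rw [show ∀ X : Int, a + b + X = a + (b + X) from fun X => by ring, ih]
        · exact ih a b _ _
      · have hcl' : (ch == ')' || ch == ']') = false := Bool.not_eq_true _ ▸ hcl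
        rw [loopA_cons_other rec rest _ tmp stk hop' hcl',
            loopA_cons_other rec rest b tmp stk hop' hcl']
        split
        · rw [show ∀ X : Int, a + b + X = a + (b + X) from fun X => by ring, ih]
        · exact ih a b _ _

theorem loopA_run (rec : List Char → Int) :
    ∀ (u v : List Char) (ans : Int) (tmp stk : List Char),
      (∀ j : Nat, 1 ≤ j → j ≤ u.length → 0 < (stk.length : Int) + dep (u.take j)) →
      ∃ stk' : List Char, (stk'.length : Int) = (stk.length : Int) + dep u ∧
        loopA rec (u ++ v) ans tmp stk = loopA rec v ans (tmp ++ u) stk' := by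
  intro u
  induction u with
  | nil => intro v ans tmp stk _; exact ⟨stk, by simp [dep_nil], by simp⟩
  | cons ch u ih =>
    intro v ans tmp stk h
    have h1 : 0 < (stk.length : Int) + wCh ch := by
      have := h 1 (by omega) (by simp)
      simpa [dep_cons, dep_nil] using this
    by_cases hop : (ch == '(' || ch == '[') = true
    · have hw := wCh_open hop
      rw [List.cons_append, loopA_cons_open rec (u ++ v) ans tmp stk hop]
      obtain ⟨stk', hl, he⟩ := ih v ans (tmp ++ [ch]) (ch :: stk) (by
        intro j hj1 hj2
        have := h (j + 1) (by omega) (by simpa using hj2)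
        simp only [List.take_succ_cons, dep_cons, hw] at this
        simp only [List.length_cons]
        push_cast at this ⊢
        omega)
      refine ⟨stk', ?_, ?_⟩
      · rw [hl]; simp only [List.length_cons, dep_cons, hw]; push_cast; ring
      · rw [he, List.append_assoc]; rfl
    · have hop' : (ch == '(' || ch == '[') = false := Bool.not_eq_true _ ▸ hop
      by_cases hcl : (ch == ')' || ch == ']') = true
      · have hw : wCh ch = -1 := wCh_close hop' hcl
        rw [hw] at h1
        obtain ⟨y, stk0, rfl⟩ : ∃ y s0, stk = y :: s0 := by
          cases stk with
          | nil => simp at h1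
          | cons y s0 => exact ⟨y, s0, rfl⟩
        rw [List.cons_append, loopA_cons_close rec (u ++ v) ans tmp (y :: stk0) hop' hcl]
        have htl : (y :: stk0).tail = stk0 := rfl
        rw [htl]
        have hne : stk0.isEmpty = false := by
          rw [List.isEmpty_eq_false_iff, ← List.length_pos_iff]
          simp only [List.length_cons] at h1; push_cast at h1; omega
        rw [if_neg (by simp [hne])]
        obtain ⟨stk', hl, he⟩ := ih v ans (tmp ++ [ch]) stk0 (by
          intro j hj1 hj2
          have := h (j + 1) (by omega) (by simpa using hj2)
          simp only [List.take_succ_cons, dep_cons, hw] at this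
          simp only [List.length_cons] at this
          push_cast at this ⊢
          omega)
        refine ⟨stk', ?_, ?_⟩
        · rw [hl]; simp only [List.length_cons, dep_cons, hw]; push_cast; ring
        · rw [he, List.append_assoc]; rfl
      · have hcl' : (ch == ')' || ch == ']') = false := Bool.not_eq_true _ ▸ hcl
        have hw : wCh ch = 0 := wCh_other hop' hcl'
        rw [hw] at h1
        have hne : stk.isEmpty = false := by
          rw [List.isEmpty_eq_false_iff, ← List.length_pos_iff]; omega
        rw [List.cons_append, loopA_cons_other rec (u ++ v) ans tmp stk hop' hcl',
            if_neg (by simp [hne])]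
        obtain ⟨stk', hl, he⟩ := ih v ans (tmp ++ [ch]) stk (by
          intro j hj1 hj2
          have := h (j + 1) (by omega) (by simpa using hj2)
          simp only [List.take_succ_cons, dep_cons, hw] at this
          omega)
        refine ⟨stk', ?_, ?_⟩
        · rw [hl]; simp only [dep_cons, hw]; ring
        · rw [he, List.append_assoc]; rfl

-- ---- proof-only model of the pass: state (cur level sum, saved sums below, prev char) ----
-- (an intermediate between A's recursion and dfs_alt's fold; related to stepL by pvCorr below)
def stepB : (Int × List Int × Option Char) → Char → (Int × List Int × Option Char)
  | (cur, stk, prev), ch =>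
    if ch == '(' || ch == '[' then (0, cur :: stk, some ch)
    else if ch == ')' || ch == ']' then
      match stk with
      | [] => (0, [], some ch)
      | outer :: s =>
        (outer + (if ch == ')' then 2 else 3) *
          (if prev == some '(' || prev == some '[' then 1 else cur), s, some ch)
    else (cur + 3, stk, some ch)

def finB : Int × List Int × Option Char → Int
  | (cur, stk, _) => match stk.getLast? with
    | some b => b
    | none => cur

theorem stepB_open {ch : Char} (c : Int) (s : List Int) (p : Option Char)
    (hop : (ch == '(' || ch == '[') = true) :
    stepB (c, s, p) ch = (0, c :: s, some ch) := by simp [stepB, hop]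

theorem stepB_close {ch : Char} (c v : Int) (s : List Int) (p : Option Char)
    (hop : (ch == '(' || ch == '[') = false) (hcl : (ch == ')' || ch == ']') = true) :
    stepB (c, v :: s, p) ch =
      (v + (if ch == ')' then 2 else 3) * (if p == some '(' || p == some '[' then 1 else c),
        s, some ch) := by
  simp [stepB, hop, hcl]

theorem stepB_other {ch : Char} (c : Int) (s : List Int) (p : Option Char)
    (hop : (ch == '(' || ch == '[') = false) (hcl : (ch == ')' || ch == ']') = false) :
    stepB (c, s, p) ch = (c + 3, s, some ch) := by simp [stepB, hop, hcl]

theorem stepB_prev (st : Int × List Int × Option Char) (ch : Char) :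
    (stepB st ch).2.2 = some ch := by
  obtain ⟨c, s, p⟩ := st
  by_cases hop : (ch == '(' || ch == '[') = true
  · simp [stepB_open c s p hop]
  · have hop' := (Bool.not_eq_true _ ▸ hop :)
    by_cases hcl : (ch == ')' || ch == ']') = true
    · cases s with
      | nil => simp [stepB, hop', hcl]
      | cons v s => simp [stepB_close c v s p hop' hcl]
    · simp [stepB_other c s p hop' (Bool.not_eq_true _ ▸ hcl :)]

-- the stack-surgery view of the model state: a is added to the bottom saved sum (or to cur if none), ext appended below
def bump (a : Int) (s : List Int) : List Int := s.dropLast ++ [s.getLastD 0 + a]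

def liftSt (a : Int) (ext : List Int) : Int × List Int × Option Char → Int × List Int × Option Char
  | (c, [], p) => (c + a, ext, p)
  | (c, s, p) => (c, bump a s ++ ext, p)

theorem liftSt_nil (a : Int) (ext : List Int) (c : Int) (p : Option Char) :
    liftSt a ext (c, [], p) = (c + a, ext, p) := rfl

theorem liftSt_cons (a : Int) (ext : List Int) (c v : Int) (s : List Int) (p : Option Char) :
    liftSt a ext (c, v :: s, p) = (c, bump a (v :: s) ++ ext, p) := rfl

theorem bump_singleton (a x : Int) : bump a [x] = [x + a] := by simp [bump]

theorem bump_cons_cons (a x y : Int) (s : List Int) :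
    bump a (x :: y :: s) = x :: bump a (y :: s) := by
  simp [bump, List.dropLast_cons₂]

theorem getLast?_bump (a : Int) (s : List Int) :
    (bump a s).getLast? = some (s.getLastD 0 + a) := by
  simp [bump]

theorem finB_liftSt (a : Int) (st : Int × List Int × Option Char) :
    finB (liftSt a [] st) = a + finB st := by
  obtain ⟨c, s, p⟩ := st
  cases s with
  | nil => simp [liftSt_nil, finB]; ring
  | cons x s =>
    have hsome : ((x :: s).getLast?).isSome := by simp
    obtain ⟨g, hg⟩ := Option.isSome_iff_exists.mp hsome
    have hgd : (x :: s).getLastD 0 = g := by simp [List.getLastD_eq_getLast?, hg]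
    simp [liftSt_cons, finB, getLast?_bump, hg, List.getLastD_eq_getLast?]
    ring

theorem stepB_liftSt {ch : Char} (a : Int) (ext : List Int) (c : Int) (s : List Int)
    (p : Option Char) (h : 0 ≤ (s.length : Int) + wCh ch) :
    stepB (liftSt a ext (c, s, p)) ch = liftSt a ext (stepB (c, s, p) ch) := by
  by_cases hop : (ch == '(' || ch == '[') = true
  · cases s with
    | nil => simp [liftSt_nil, liftSt_cons, stepB, hop, bump_singleton]
    | cons v s => simp [liftSt_cons, stepB, hop, bump_cons_cons]
  · have hop' : (ch == '(' || ch == '[') = false := Bool.not_eq_true _ ▸ hop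
    by_cases hcl : (ch == ')' || ch == ']') = true
    · have hw := wCh_close hop' hcl
      rw [hw] at h
      cases s with
      | nil => simp at h
      | cons v s =>
        cases s with
        | nil =>
          simp [liftSt_cons, liftSt_nil, bump_singleton, stepB, hop', hcl]
          ring
        | cons v2 s =>
          simp [liftSt_cons, bump_cons_cons, stepB, hop', hcl]
    · have hcl' : (ch == ')' || ch == ']') = false := Bool.not_eq_true _ ▸ hcl
      cases s with
      | nil =>
        simp [liftSt_nil, stepB, hop', hcl']
        ring
      | cons v s => simp [liftSt_cons, stepB, hop', hcl']

theorem stepB_len {ch : Char} (c : Int) (s : List Int) (p : Option Char)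
    (h : 0 ≤ (s.length : Int) + wCh ch) :
    ((stepB (c, s, p) ch).2.1.length : Int) = (s.length : Int) + wCh ch := by
  by_cases hop : (ch == '(' || ch == '[') = true
  · rw [stepB_open _ _ _ hop, wCh_open hop]; push_cast; simp
  · have hop' : (ch == '(' || ch == '[') = false := Bool.not_eq_true _ ▸ hop
    by_cases hcl : (ch == ')' || ch == ']') = true
    · have hw := wCh_close hop' hcl
      rw [hw] at h ⊢
      cases s with
      | nil => simp at h
      | cons v s => rw [stepB_close _ _ _ _ hop' hcl]; push_cast; simp
    · have hcl' : (ch == ')' || ch == ']') = false := Bool.not_eq_true _ ▸ hcl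
      rw [stepB_other _ _ _ hop' hcl', wCh_other hop' hcl']; simp

theorem foldB_liftSt :
    ∀ (u : List Char) (a : Int) (ext : List Int) (c : Int) (s : List Int) (p : Option Char),
      (∀ k : Nat, k ≤ u.length → 0 ≤ (s.length : Int) + dep (u.take k)) →
      u.foldl stepB (liftSt a ext (c, s, p)) = liftSt a ext (u.foldl stepB (c, s, p)) := by
  intro u
  induction u with
  | nil => intro a ext c s p _; rfl
  | cons ch u ih =>
    intro a ext c s p h
    have h1 : 0 ≤ (s.length : Int) + wCh ch := by
      have := h 1 (by simp)
      simpa [dep_cons, dep_nil] using this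
    rw [List.foldl_cons, List.foldl_cons, stepB_liftSt a ext c s p h1]
    rcases hst : stepB (c, s, p) ch with ⟨c1, s1, p1⟩
    apply ih
    intro k hk
    have hl1 : (s1.length : Int) = (s.length : Int) + wCh ch := by
      have := stepB_len c s p h1; rw [hst] at this; exact this
    have := h (k + 1) (by simpa using hk)
    simp only [List.take_succ_cons, dep_cons] at this
    omega

theorem foldB_len :
    ∀ (u : List Char) (c : Int) (s : List Int) (p : Option Char),
      (∀ k : Nat, k ≤ u.length → 0 ≤ (s.length : Int) + dep (u.take k)) →
      (((u.foldl stepB (c, s, p)).2.1.length : Int)) = (s.length : Int) + dep u := by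
  intro u
  induction u with
  | nil => intro c s p _; simp [dep_nil]
  | cons ch u ih =>
    intro c s p h
    have h1 : 0 ≤ (s.length : Int) + wCh ch := by
      have := h 1 (by simp)
      simpa [dep_cons, dep_nil] using this
    rw [List.foldl_cons]
    rcases hst : stepB (c, s, p) ch with ⟨c1, s1, p1⟩
    have hlen1 : (s1.length : Int) = (s.length : Int) + wCh ch := by
      have := stepB_len c s p h1; rw [hst] at this; exact this
    have := ih c1 s1 p1 (by
      intro k hk
      have := h (k + 1) (by simpa using hk)
      simp only [List.take_succ_cons, dep_cons] at this
      omega)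
    rw [this, hlen1, dep_cons]; ring

theorem foldB_prev_irrel (u : List Char) (c : Int) (s : List Int) (p1 p2 : Option Char)
    (hne : u ≠ []) (h : 0 ≤ dep (u.take 1)) :
    u.foldl stepB (c, s, p1) = u.foldl stepB (c, s, p2) := by
  cases u with
  | nil => exact absurd rfl hne
  | cons ch u =>
    have hw : 0 ≤ wCh ch := by simpa [dep_cons, dep_nil] using h
    have hstep : stepB (c, s, p1) ch = stepB (c, s, p2) ch := by
      by_cases hcl : (ch == ')' || ch == ']') = true
      · have := wCh_close (close_open_false hcl) hcl; omega
      · have hcl' : (ch == ')' || ch == ']') = false := Bool.not_eq_true _ ▸ hcl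
        by_cases hop : (ch == '(' || ch == '[') = true
        · rw [stepB_open _ _ _ hop, stepB_open _ _ _ hop]
        · have hop' : (ch == '(' || ch == '[') = false := Bool.not_eq_true _ ▸ hop
          rw [stepB_other _ _ _ hop' hcl', stepB_other _ _ _ hop' hcl']
    rw [List.foldl_cons, List.foldl_cons, hstep]

theorem finB_prev (u : List Char) (c : Int) (p1 p2 : Option Char) (h : 0 ≤ dep (u.take 1)) :
    finB (u.foldl stepB (c, [], p1)) = finB (u.foldl stepB (c, [], p2)) := by
  cases u with
  | nil => rfl
  | cons r rs => rw [foldB_prev_irrel (r :: rs) c [] p1 p2 (by simp) h]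

theorem foldB_last (u : List Char) (ch : Char) (st : Int × List Int × Option Char) :
    ((u ++ [ch]).foldl stepB st).2.2 = some ch := by
  rw [List.foldl_append]
  simp [stepB_prev]

theorem finB_from (K : Int) (p : Option Char) (u : List Char)
    (hok : ∀ k : Nat, k ≤ u.length → 0 ≤ dep (u.take k)) :
    finB (u.foldl stepB (K, [], p)) = K + finB (u.foldl stepB (0, [], p)) := by
  have h0 : ((K : Int), ([] : List Int), p) = liftSt K [] (0, [], p) := by
    rw [liftSt_nil]; norm_num
  rw [h0, foldB_liftSt u K [] 0 [] p (by intro k hk; simpa using hok k hk), finB_liftSt]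

theorem dfs_main : ∀ (n : Nat) (cs : List Char) (f : Nat), cs.length = n → n ≤ f →
    (∀ k : Nat, k ≤ n → 0 ≤ dep (cs.take k)) →
    loopA (dfsA f) cs 0 [] [] = finB (cs.foldl stepB (0, [], none)) := by
  intro n
  induction n using Nat.strong_induction_on with
  | _ n IH =>
  intro cs f hlen hf hok
  cases cs with
  | nil => simp [loopA, finB]
  | cons x t =>
    have hlt : t.length + 1 = n := by simpa using hlen
    by_cases hop : (x == '(' || x == '[') = true
    · -- opener
      have hwx := wCh_open hop
      by_cases hz : ∃ k, 1 ≤ k ∧ k ≤ n ∧ dep ((x :: t).take k) = 0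
      · -- the bracket opened by x closes: split off the first balanced segment
        obtain ⟨hk1, hkn, hk0⟩ := Nat.find_spec hz
        set k := Nat.find hz with hkdef
        have hmin : ∀ j, 1 ≤ j → j < k → 0 < dep ((x :: t).take j) := by
          intro j hj1 hjk
          have h0 := hok j (by omega)
          have hne : dep ((x :: t).take j) ≠ 0 := by
            intro he
            exact Nat.find_min hz hjk ⟨hj1, by omega, he⟩
          omega
        have hk2 : 2 ≤ k := by
          by_contra hlt2
          have hk1' : k = 1 := by omega
          rw [hk1'] at hk0
          have : dep ((x :: t).take 1) = 1 := by
            simp [dep_cons, dep_nil, hwx]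
          omega
        have hjt : k - 1 ≤ t.length := by omega
        have htne : t.take (k - 1) ≠ [] := by
          intro he
          rcases List.take_eq_nil_iff.mp he with h | h
          · omega
          · subst h; simp at hjt; omega
        obtain ⟨inner, c, hic⟩ := (List.eq_nil_or_concat (t.take (k - 1))).resolve_left htne
        rw [List.concat_eq_append] at hic
        set rest := t.drop (k - 1) with hrestdef
        have ht : t = (inner ++ [c]) ++ rest := by rw [← hic, hrestdef, List.take_append_drop]
        have hinlen : inner.length = k - 2 := by
          have h1 := congrArg List.length hic
          rw [List.length_take] at h1
          simp at h1
          omega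
        have hrlen : rest.length = t.length - (k - 1) := by simp [hrestdef]
        have htakek : (x :: t).take k = x :: (inner ++ [c]) := by
          have hk' : k = (k - 1) + 1 := by omega
          rw [hk', List.take_succ_cons, hic]
        rw [htakek, dep_cons, dep_append, dep_cons, dep_nil, hwx] at hk0
        have htinner : ∀ j : Nat, j ≤ inner.length → t.take j = inner.take j := by
          intro j hj
          rw [ht, List.take_append_of_le_length (by simp; omega),
              List.take_append_of_le_length hj]
        have htakekm1 : (x :: t).take (k - 1) = x :: inner := by
          have hk' : k - 1 = (k - 2) + 1 := by omega
          rw [hk', List.take_succ_cons, show t.take (k-2) = inner from by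
            rw [htinner (k-2) (by omega), ← hinlen, List.take_length]]
        have hdepm1 : 0 < 1 + dep inner := by
          have := hmin (k - 1) (by omega) (by omega)
          rw [htakekm1, dep_cons, hwx] at this
          exact this
        have hwc : wCh c = -1 := by rcases wCh_cases c with h | h | h <;> omega
        have hdepinner : dep inner = 0 := by omega
        have hclc := wCh_close_of_eq hwc
        have hopc := close_open_false hclc
        have hstrict : ∀ j : Nat, 1 ≤ j → j ≤ inner.length → 0 < 1 + dep (inner.take j) := by
          intro j hj1 hj
          have := hmin (j + 1) (by omega) (by omega)
          rw [List.take_succ_cons, dep_cons, hwx, htinner j hj] at this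
          exact this
        have hokin : ∀ j : Nat, j ≤ inner.length → 0 ≤ dep (inner.take j) := by
          intro j hj
          rcases Nat.eq_zero_or_pos j with rfl | hj1
          · simp [dep_nil]
          · have := hstrict j hj1 hj
            omega
        have hokrest : ∀ j : Nat, j ≤ rest.length → 0 ≤ dep (rest.take j) := by
          intro j hj
          have hkj : k + j ≤ n := by omega
          have h0 := hok (k + j) hkj
          have htk : (x :: t).take (k + j) = x :: ((inner ++ [c]) ++ rest.take j) := by
            have hk' : k + j = ((k - 1) + j) + 1 := by omega
            rw [hk', List.take_succ_cons, ht]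
            congr 1
            have hlen' : (inner ++ [c]).length = k - 1 := by simp [hinlen]; omega
            rw [show (k - 1) + j = (inner ++ [c]).length + j from by rw [hlen'],
                List.take_length_add_append]
          rw [htk, dep_cons, dep_append, dep_append, dep_cons, dep_nil, hwx] at h0
          omega
        have ht' : t = inner ++ (c :: rest) := by rw [ht]; simp
        rw [ht']
        -- ===== A side =====
        rw [loopA_cons_open (dfsA f) _ 0 [] [] hop]
        obtain ⟨stk1, hstk1, hA1⟩ := loopA_run (dfsA f) inner (c :: rest) 0 ([] ++ [x]) [x] (by
          intro j hj1 hj2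
          have := hstrict j hj1 hj2
          simpa using this)
        rw [hA1]
        obtain ⟨y, rfl⟩ : ∃ y, stk1 = [y] := by
          have h1 : stk1.length = 1 := by
            rw [hdepinner] at hstk1
            simp at hstk1
            exact_mod_cast hstk1
          exact List.length_eq_one_iff.mp h1
        rw [loopA_cons_close (dfsA f) rest 0 ([] ++ [x] ++ inner) [y] hopc hclc,
            if_pos (show ([y].tail.isEmpty) = true from rfl)]
        have hslice : ((([] ++ [x] ++ inner) ++ [c]).drop 1).dropLast = inner := by
          simp
        rw [hslice]
        rw [show (0 : Int) + (if c == ')' then 2 else 3) * dfsA f inner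
              = ((if c == ')' then 2 else 3) * dfsA f inner) + 0 from by ring,
            loopA_add]
        simp only [List.tail_cons]
        have hIHrest := IH rest.length (by omega) rest f rfl (by omega) hokrest
        rw [hIHrest]
        obtain ⟨f0, rfl⟩ : ∃ f0, f = f0 + 1 := ⟨f - 1, by omega⟩
        -- ===== B side =====
        rw [List.foldl_cons, stepB_open 0 [] none hop, List.foldl_append]
        rw [show ((0 : Int), ([0] : List Int), some x) = liftSt 0 [0] (0, [], some x) from by
          rw [liftSt_nil]; norm_num]
        rw [foldB_liftSt inner 0 [0] 0 [] (some x) (by intro j hj; simpa using hokin j hj)]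
        rcases hstI : inner.foldl stepB (0, [], some x) with ⟨cI, sI, pI⟩
        have hsI : sI = [] := by
          have hL := foldB_len inner 0 [] (some x) (by intro j hj; simpa using hokin j hj)
          rw [hstI, hdepinner] at hL
          simp at hL
          exact hL
        subst hsI
        rw [liftSt_nil, List.foldl_cons, stepB_close (cI + 0) 0 [] pI hopc hclc]
        rw [finB_from _ (some c) rest hokrest]
        have hdep1rest : 0 ≤ dep (rest.take 1) := by
          by_cases hr0 : rest.length = 0
          · rw [List.length_eq_zero_iff.mp hr0]; simp [dep_nil]
          · exact hokrest 1 (by omega)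
        rw [finB_prev rest _ (some c) none hdep1rest]
        by_cases hinn : inner = []
        · subst hinn
          simp only [List.foldl_nil, Prod.mk.injEq] at hstI
          obtain ⟨hcI, -, hpI⟩ := hstI
          have hiv : (pI == some '(' || pI == some '[') = true := by
            rcases Bool.or_eq_true_iff.mp hop with h | h <;>
              rw [← hpI, show x = _ from beq_iff_eq.mp h] <;> rfl
          rw [dfsA_nil (by omega), hiv]
          simp
        · have hIHin := IH inner.length (by omega) inner f0 rfl (by omega) hokin
          rw [show dfsA (f0 + 1) inner = loopA (dfsA f0) inner 0 [] [] from by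
            simp [dfsA, hinn], hIHin]
          have hswap : inner.foldl stepB (0, [], some x) = inner.foldl stepB (0, [], none) :=
            foldB_prev_irrel inner 0 [] (some x) none hinn (hokin 1 (by
              rcases inner with _ | ⟨i, is⟩
              · exact absurd rfl hinn
              · simp))
          rw [hswap] at hstI
          obtain ⟨w, lc, hwlc⟩ := (List.eq_nil_or_concat inner).resolve_left hinn
          rw [List.concat_eq_append] at hwlc
          have hpI : pI = some lc := by
            have hl := foldB_last w lc ((0 : Int), ([] : List Int), (none : Option Char))
            rw [← hwlc, hstI] at hl
            exact hl
          have hdw : 0 ≤ dep w := by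
            have := hokin w.length (by rw [hwlc]; simp)
            rw [hwlc, List.take_left] at this
            exact this
          have hdeplc : dep inner = dep w + wCh lc := by
            rw [hwlc, dep_append, dep_cons, dep_nil]; ring
          have hlcnotopen : (lc == '(' || lc == '[') = false := by
            by_contra hb
            have hb' : (lc == '(' || lc == '[') = true := by
              revert hb; cases (lc == '(' || lc == '[') <;> simp
            have := wCh_open hb'
            omega
          have hiv : (pI == some '(' || pI == some '[') = false := by
            rw [hpI]
            simpa using hlcnotopen
          have hfinI : finB (inner.foldl stepB (0, [], none)) = cI := by
            rw [hstI]; rfl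
          rw [hfinI, hiv]
          simp
      · -- the bracket opened by x never closes: both sides are 0
        have hpos : ∀ j : Nat, 1 ≤ j → j ≤ n → 0 < dep ((x :: t).take j) := by
          intro j h1 h2
          have h0 := hok j h2
          have hne : dep ((x :: t).take j) ≠ 0 := fun he => hz ⟨j, h1, h2, he⟩
          omega
        rw [loopA_cons_open (dfsA f) t 0 [] [] hop]
        obtain ⟨stk1, hstk1, hA1⟩ := loopA_run (dfsA f) t [] 0 ([] ++ [x]) [x] (by
          intro j hj1 hj2
          have := hpos (j + 1) (by omega) (by omega)
          rw [List.take_succ_cons, dep_cons, hwx] at this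
          simpa using this)
        have hA : loopA (dfsA f) t 0 ([] ++ [x]) [x] = 0 := by
          conv_lhs => rw [← List.append_nil t]
          rw [hA1]
          simp [loopA]
        rw [hA]
        rw [List.foldl_cons, stepB_open 0 [] none hop]
        rw [show ((0 : Int), ([0] : List Int), some x) = liftSt 0 [0] (0, [], some x) from by
          rw [liftSt_nil]; norm_num]
        rw [foldB_liftSt t 0 [0] 0 [] (some x) (by
          intro j hj
          rcases Nat.eq_zero_or_pos j with rfl | hj1
          · simp [dep_nil]
          · have := hpos (j + 1) (by omega) (by omega)
            rw [List.take_succ_cons, dep_cons, hwx] at this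
            simp
            omega)]
        rcases t.foldl stepB (0, [], some x) with ⟨cT, sT, pT⟩
        cases sT with
        | nil => rw [liftSt_nil]; simp [finB]
        | cons v sT => rw [liftSt_cons]; simp [finB]
    · have hop' : (x == '(' || x == '[') = false := Bool.not_eq_true _ ▸ hop
      by_cases hcl : (x == ')' || x == ']') = true
      · -- a closing bracket with empty stack is excluded by the precondition
        exfalso
        have h1 := hok 1 (by omega)
        rw [show (x :: t).take 1 = [x] from by simp, dep_cons, dep_nil,
            wCh_close hop' hcl] at h1
        omega
      · -- ordinary character: contributes 3 on both sides
        have hcl' : (x == ')' || x == ']') = false := Bool.not_eq_true _ ▸ hcl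
        have hwx := wCh_other hop' hcl'
        have hokt : ∀ j : Nat, j ≤ t.length → 0 ≤ dep (t.take j) := by
          intro j hj
          have := hok (j + 1) (by omega)
          simpa [List.take_succ_cons, dep_cons, hwx] using this
        rw [loopA_cons_other (dfsA f) t 0 [] [] hop' hcl',
            if_pos (show (List.isEmpty ([] : List Char)) = true from rfl)]
        rw [show ((([] : List Char) ++ [x]).drop 1).dropLast = ([] : List Char) from rfl]
        rw [dfsA_nil (show 1 ≤ f by omega)]
        rw [show (0 : Int) + 3 * 1 = 3 + 0 from by ring, loopA_add]
        have hIHt := IH t.length (by omega) t f rfl (by omega) hokt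
        rw [hIHt]
        rw [List.foldl_cons, stepB_other 0 [] none hop' hcl']
        rw [finB_from (0 + 3) (some x) t hokt]
        have hdep1t : 0 ≤ dep (t.take 1) := by
          by_cases ht0 : t.length = 0
          · rw [List.length_eq_zero_iff.mp ht0]; simp [dep_nil]
          · exact hokt 1 (by omega)
        rw [finB_prev t _ (some x) none hdep1t]
        ring

-- ---- correspondence between dfs_alt's fold (stepL) and the model fold (stepB) ----
-- isOpen of the previous character
def prevOp (p : Option Char) : Bool := p == some '(' || p == some '['

theorem pvCorr :
    ∀ (u : List Char) (c : Int) (stk : List Int) (p : Option Char) (flgs : List Bool) (e : Bool),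
      flgs.length = stk.length →
      (stk ≠ [] → e = prevOp p) →
      (∀ k : Nat, k ≤ u.length → 0 ≤ (stk.length : Int) + dep (u.take k)) →
      ∃ flgs' e', flgs'.length = (u.foldl stepB (c, stk, p)).2.1.length ∧
        ((u.foldl stepB (c, stk, p)).2.1 ≠ [] → e' = prevOp (u.foldl stepB (c, stk, p)).2.2) ∧
        u.foldl stepL ((c, e) :: stk.zip flgs) =
          ((u.foldl stepB (c, stk, p)).1, e') :: (u.foldl stepB (c, stk, p)).2.1.zip flgs' := by
  intro u
  induction u with
  | nil => intro c stk p flgs e hlen he _; exact ⟨flgs, e, hlen, he, rfl⟩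
  | cons ch u ih =>
    intro c stk p flgs e hlen he h
    have h1 : 0 ≤ (stk.length : Int) + wCh ch := by
      have := h 1 (by simp)
      simpa [dep_cons, dep_nil] using this
    have hnext : ∀ (c1 : Int) (s1 : List Int) (p1 : Option Char),
        stepB (c, stk, p) ch = (c1, s1, p1) →
        (∀ k : Nat, k ≤ u.length → 0 ≤ (s1.length : Int) + dep (u.take k)) := by
      intro c1 s1 p1 hst k hk
      have hl1 : (s1.length : Int) = (stk.length : Int) + wCh ch := by
        have := stepB_len c stk p h1; rw [hst] at this; exact this
      have := h (k + 1) (by simpa using hk)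
      simp only [List.take_succ_cons, dep_cons] at this
      omega
    by_cases hop : (ch == '(' || ch == '[') = true
    · rw [List.foldl_cons, List.foldl_cons, stepB_open c stk p hop,
          show stepL ((c, e) :: stk.zip flgs) ch = (0, true) :: (c, e) :: stk.zip flgs from by
            simp [stepL, hop]]
      have hz : (c, e) :: stk.zip flgs = (c :: stk).zip (e :: flgs) := by simp
      rw [hz]
      refine ih 0 (c :: stk) (some ch) (e :: flgs) true (by simp [hlen]) ?_
        (hnext 0 (c :: stk) (some ch) (stepB_open c stk p hop))
      intro _
      rcases Bool.or_eq_true_iff.mp hop with h' | h' <;>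
        rw [show ch = _ from beq_iff_eq.mp h'] <;> rfl
    · have hop' : (ch == '(' || ch == '[') = false := Bool.not_eq_true _ ▸ hop
      by_cases hcl : (ch == ')' || ch == ']') = true
      · have hw : wCh ch = -1 := wCh_close hop' hcl
        rw [hw] at h1
        obtain ⟨v, s, rfl⟩ : ∃ v s, stk = v :: s := by
          cases stk with
          | nil => simp at h1
          | cons v s => exact ⟨v, s, rfl⟩
        obtain ⟨f0, fs, rfl⟩ : ∃ f0 fs, flgs = f0 :: fs := by
          cases flgs with
          | nil => simp at hlen
          | cons f0 fs => exact ⟨f0, fs, rfl⟩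
        have hlen' : fs.length = s.length := by simpa using hlen
        have hev : e = prevOp p := he (by simp)
        have hstep : stepL ((c, e) :: (v :: s).zip (f0 :: fs)) ch =
            (v + (if ch == ')' then 2 else 3) * (if e then 1 else c), false) :: s.zip fs := by
          simp [stepL, hop', hcl]
        rw [List.foldl_cons, List.foldl_cons, hstep,
            stepB_close c v s p hop' hcl, hev]
        have hiv : (if prevOp p = true then (1 : Int) else c) =
            (if (p == some '(' || p == some '[') = true then 1 else c) := by rfl
        rw [show v + (if ch == ')' then 2 else 3) * (if prevOp p = true then (1:Int) else c)
              = v + (if ch == ')' then 2 else 3) * (if (p == some '(' || p == some '[') = true then 1 else c) from by rw [hiv]]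
        refine ih _ s (some ch) fs false hlen' ?_
          (hnext _ s (some ch) (stepB_close c v s p hop' hcl))
        intro _
        have hc1 : (ch == '(') = false := (Bool.or_eq_false_iff.mp hop').1
        have hc2 : (ch == '[') = false := (Bool.or_eq_false_iff.mp hop').2
        simp [prevOp, hc1, hc2]
      · have hcl' : (ch == ')' || ch == ']') = false := Bool.not_eq_true _ ▸ hcl
        have hstep : stepL ((c, e) :: stk.zip flgs) ch = (c + 3, false) :: stk.zip flgs := by
          simp [stepL, hop', hcl']
        rw [List.foldl_cons, List.foldl_cons, hstep, stepB_other c stk p hop' hcl']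
        refine ih (c + 3) stk (some ch) flgs false hlen ?_
          (hnext (c + 3) stk (some ch) (stepB_other c stk p hop' hcl'))
        intro _
        have hc1 : (ch == '(') = false := (Bool.or_eq_false_iff.mp hop').1
        have hc2 : (ch == '[') = false := (Bool.or_eq_false_iff.mp hop').2
        simp [prevOp, hc1, hc2]

-- bottom of the (value, flag) stack projects to finB of the model state
theorem pvZipLast : ∀ (l : List Int) (f : List Bool) (c : Int) (e : Bool) (p : Option Char),
    f.length = l.length →
    (match ((c, e) :: l.zip f).getLast? with
      | some te => te.1
      | none => (0 : Int)) = finB (c, l, p) := by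
  intro l
  induction l with
  | nil => intro f c e p hf; rw [List.length_eq_zero_iff.mp hf]; rfl
  | cons v s ih =>
    intro f c e p hf
    obtain ⟨f0, fs, rfl⟩ : ∃ f0 fs, f = f0 :: fs := by
      cases f with
      | nil => simp at hf
      | cons f0 fs => exact ⟨f0, fs, rfl⟩
    have hf' : fs.length = s.length := by simpa using hf
    have h1 : ((c, e) :: (v :: s).zip (f0 :: fs)).getLast? = ((v, f0) :: s.zip fs).getLast? := by
      simp [List.getLast?_cons_cons]
    have h2 := ih fs v f0 p hf'
    have h3 : finB (c, v :: s, p) = finB (v, s, p) := by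
      cases s with
      | nil => rfl
      | cons w ws =>
        obtain ⟨g, hg⟩ := Option.isSome_iff_exists.mp
          (show ((w :: ws).getLast?).isSome from by simp)
        simp [finB, List.getLast?_cons_cons, hg]
    rw [h1, h3, ← h2]

-- ===== VERDICT (by name: the statement is the Claim_ definition above) =====
theorem dfs_spec : Claim_equal_dfs := by
  intro s _ hpre
  unfold Spec_dfs dfs dfs_alt Pre_dfs at *
  cases hcs : s.toList with
  | nil => simp [dfsA]
  | cons x t =>
    rw [hcs] at hpre
    rw [show dfsA ((x :: t).length + 1) (x :: t) = loopA (dfsA ((x :: t).length)) (x :: t) 0 [] []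
      from by simp [dfsA]]
    rw [dfs_main (x :: t).length (x :: t) (x :: t).length rfl le_rfl hpre]
    obtain ⟨flgs', e', hl', _, heq⟩ :=
      pvCorr (x :: t) 0 [] none [] true rfl (fun h => absurd rfl h)
        (by intro k hk; simpa using hpre k hk)
    rcases hst : (x :: t).foldl stepB (0, [], none) with ⟨c', stk', p'⟩
    rw [hst] at heq hl'
    rw [show ((0 : Int), true) :: ([] : List Int).zip ([] : List Bool) = [((0 : Int), true)] from rfl] at heq
    simp only [List.isEmpty_cons, if_neg (by simp : ¬((false : Bool) = true))]
    rw [heq, pvZipLast stk' flgs' c' e' p' hl']
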